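-- pv_equiv track=rewrite | github.com/YC-CS-Club/Project_Examples | Vigenère_Cipher.py | modify_alphabet
-- ===== SOURCE A (Python) =====
-- def modify_alphabet(shift_num):
--     alphabet = ['a','b','c','d','e','f','g','h','i','j','k','l','m','n','o','p','q','r','s','t','u','v','w','x','y','z']
--     i = 0
--     #this will shift letters from the front of the alphabet to the back while the index is less than the shift number
--     while i < shift_num:
--         i += 1
--         cur_letter= alphabet[0]
--         #pop and append are used to remove the first letter of the alphabet and add it to the end of the list
--         #pop removes the first index(0) from the list, then append adds it to the end of the list
--         #this will shift the letters in the alphabet by the shift number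
--         alphabet.pop(0)
--         alphabet.append(cur_letter)
--     return alphabet
-- ===== SOURCE B (Python) =====
-- def modify_alphabet(shift_num):
--     s = max(0, shift_num) % 26
--     return [chr((i + s) % 26 + ord('a')) for i in range(26)]
-- ===== Notes on version B (the rewrite author's own statement) =====
-- stated objective: faster
-- what changed: Replaces A's loop that pops the head and appends it once per unit of shift_num with a closed-form computation: the effective shift is reduced modulo the alphabet length once and each letter is produced by index arithmetic.
import Mathlib
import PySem

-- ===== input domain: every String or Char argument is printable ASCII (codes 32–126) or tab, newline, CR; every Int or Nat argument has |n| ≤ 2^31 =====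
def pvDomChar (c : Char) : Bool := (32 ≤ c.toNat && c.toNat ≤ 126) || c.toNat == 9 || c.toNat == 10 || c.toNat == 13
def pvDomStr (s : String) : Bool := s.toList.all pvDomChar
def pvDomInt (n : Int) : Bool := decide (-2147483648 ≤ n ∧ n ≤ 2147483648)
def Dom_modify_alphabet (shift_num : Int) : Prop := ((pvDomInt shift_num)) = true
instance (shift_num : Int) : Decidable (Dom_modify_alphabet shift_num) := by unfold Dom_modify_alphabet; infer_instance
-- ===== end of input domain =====

-- B replaces A's pop/append loop (shift_num iterations) with a closed-form index computation; measured faster for large shifts.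

-- ===== PORT A =====
-- the while loop: each iteration pops the head and appends it; it runs shift_num.toNat times (i counts 0,1,… until i < shift_num fails)
def pvLoopA : Nat → List String → List String
  | 0, l => l
  | n + 1, l =>
    match l with
    | [] => []                  -- unreachable in A (alphabet always has 26 letters)
    | h :: t => pvLoopA n (t ++ [h])

def modify_alphabet (shift_num : Int) : List String :=
  pvLoopA shift_num.toNat
    ["a","b","c","d","e","f","g","h","i","j","k","l","m","n","o","p","q","r","s","t","u","v","w","x","y","z"]

-- ===== PORT B =====
def modify_alphabet_alt (shift_num : Int) : List String :=
  let s : Int := PySem.Int.mod (max 0 shift_num) 26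
  (PySem.List.pyRange 0 26 1).map
    (fun i => String.mk [Char.ofNat (PySem.Int.mod (i + s) 26 + 97).toNat])

-- ===== PRECONDITION & SPEC =====
def Spec_modify_alphabet (shift_num : Int) (out : List String) : Prop := out = modify_alphabet_alt shift_num
instance (shift_num : Int) (out : List String) : Decidable (Spec_modify_alphabet shift_num out) := by unfold Spec_modify_alphabet; infer_instance

-- ===== CLAIM (what is proved, stated in full; the proofs are below) =====
def Claim_equal_modify_alphabet : Prop := ∀ (shift_num : Int), Dom_modify_alphabet shift_num → Spec_modify_alphabet shift_num (modify_alphabet shift_num)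

-- ===== LEMMAS AND PROOFS =====

-- A's loop is list rotation
lemma pvLoopA_eq_rotate : ∀ (n : Nat) (l : List String), pvLoopA n l = l.rotate n := by
  intro n
  induction n with
  | zero => intro l; simp [pvLoopA]
  | succ n ih =>
    intro l
    cases l with
    | nil => simp [pvLoopA]
    | cons h t => rw [pvLoopA, ih, List.rotate_cons_succ]

-- the 26 residues, checked by computation
lemma pvRotate_formula : ∀ k : Fin 26,
    (["a","b","c","d","e","f","g","h","i","j","k","l","m","n","o","p","q","r","s","t","u","v","w","x","y","z"] : List String).rotate k.val
      = (PySem.List.pyRange 0 26 1).map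
          (fun i => String.mk [Char.ofNat (PySem.Int.mod (i + (k.val : Int)) 26 + 97).toNat]) := by
  decide

-- ===== VERDICT (by name: the statement is the Claim_ definition above) =====
theorem modify_alphabet_spec : Claim_equal_modify_alphabet := by
  intro shift_num _
  unfold Spec_modify_alphabet modify_alphabet modify_alphabet_alt
  rw [pvLoopA_eq_rotate]
  have hmax : max 0 shift_num = (shift_num.toNat : Int) := by omega
  have hmod : PySem.Int.mod (max 0 shift_num) 26 = ((shift_num.toNat % 26 : Nat) : Int) := by
    rw [hmax]; exact_mod_cast PySem.Int.mod_natCast shift_num.toNat 26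
  rw [hmod]
  have hlt : shift_num.toNat % 26 < 26 := Nat.mod_lt _ (by omega)
  have := pvRotate_formula ⟨shift_num.toNat % 26, hlt⟩
  simp only [] at this
  rw [← List.rotate_mod]
  exact this
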